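-- pv_equiv track=rewrite | github.com/Sourabsb/sof-event-extractor | sof-event-extractor/backend/utils/gpt_extractor.py | _parse_gpt_text_response
-- ===== SOURCE A (Python) =====
-- from typing import List, Dict, Optional
--
-- def _parse_gpt_text_response(response_text: str) -> List[Dict]:
--     """
--     Parse GPT text response when JSON parsing fails
--
--     Args:
--         response_text: Raw GPT response
--
--     Returns:
--         List of parsed events
--     """
--     events = []
--     lines = response_text.strip().split('\n')
--
--     current_event = {}
--     for line in lines:
--         line = line.strip()
--         if not line:
--             continue
--
--         # Look for event patterns in text response
--         if line.startswith('Event:') or line.startswith('event:'):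
--             if current_event:
--                 events.append(current_event)
--             current_event = {"event": line.split(':', 1)[1].strip()}
--         elif line.startswith('Start:') or line.startswith('start:'):
--             current_event["start"] = line.split(':', 1)[1].strip()
--         elif line.startswith('End:') or line.startswith('end:'):
--             end_time = line.split(':', 1)[1].strip()
--             current_event["end"] = end_time if end_time.lower() != 'null' else None
--
--     if current_event:
--         events.append(current_event)
--
--     return events
-- ===== SOURCE B (Python) =====
-- from typing import List, Dict, Optional
--
--
-- def _parse_gpt_text_response(response_text: str) -> List[Dict]:
--     cleaned = [l for l in (raw.strip() for raw in response_text.strip().split('\n')) if l]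
--
--     # split the cleaned lines into segments, each segment starting at an Event line
--     segments = [[]]
--     for line in cleaned:
--         if line.startswith('Event:') or line.startswith('event:'):
--             segments.append([line])
--         else:
--             segments[-1].append(line)
--
--     events = []
--     for seg in segments:
--         d = {}
--         for line in seg:
--             if line.startswith('Event:') or line.startswith('event:'):
--                 d["event"] = line.split(':', 1)[1].strip()
--             elif line.startswith('Start:') or line.startswith('start:'):
--                 d["start"] = line.split(':', 1)[1].strip()
--             elif line.startswith('End:') or line.startswith('end:'):
--                 v = line.split(':', 1)[1].strip()
--                 d["end"] = v if v.lower() != 'null' else None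
--         if d:
--             events.append(d)
--     return events
-- ===== Notes on version B (the rewrite author's own statement) =====
-- stated objective: alternative
-- what changed: B first splits the cleaned non-empty lines into segments at each Event:/event: line (keeping a leading pre-Event segment) and then maps each segment to a dict independently, instead of A's single stateful pass that carries a current-event dict and flushes it on the next Event line.
import Mathlib
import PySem

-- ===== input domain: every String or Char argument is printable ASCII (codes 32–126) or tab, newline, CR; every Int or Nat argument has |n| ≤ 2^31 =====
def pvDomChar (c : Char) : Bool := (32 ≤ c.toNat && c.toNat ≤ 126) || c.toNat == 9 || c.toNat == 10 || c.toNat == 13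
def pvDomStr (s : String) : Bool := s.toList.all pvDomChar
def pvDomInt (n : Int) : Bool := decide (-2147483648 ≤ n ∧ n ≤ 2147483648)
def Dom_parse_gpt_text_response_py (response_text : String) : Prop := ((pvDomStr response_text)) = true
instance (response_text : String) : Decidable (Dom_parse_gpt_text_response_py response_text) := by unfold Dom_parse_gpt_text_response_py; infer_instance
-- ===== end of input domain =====

-- B re-decomposes A's single stateful line loop into segment-splitting followed by an
-- independent per-segment field scan; same cost, alternative structure.

-- ===== PORT A =====
-- line.split(':', 1)[1].strip()  (the colon is guaranteed by the startswith test, so [1] exists)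
def pvA_val (line : String) : String :=
  PySem.Str.strip (((PySem.Str.splitMax? line ":" 1).getD []).getD 1 "")

-- the loop body after `line = line.strip()` / `if not line: continue`
def pvA_line (st : List (PySem.Dict String (Option String)) × PySem.Dict String (Option String))
    (line : String) : List (PySem.Dict String (Option String)) × PySem.Dict String (Option String) :=
  if PySem.Str.startswith line "Event:" || PySem.Str.startswith line "event:" then
    ((if st.2.items.isEmpty then st.1 else st.1 ++ [st.2]),
     PySem.Dict.insert PySem.Dict.empty "event" (some (pvA_val line)))
  else if PySem.Str.startswith line "Start:" || PySem.Str.startswith line "start:" then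
    (st.1, st.2.insert "start" (some (pvA_val line)))
  else if PySem.Str.startswith line "End:" || PySem.Str.startswith line "end:" then
    let endTime := pvA_val line
    (st.1, st.2.insert "end" (if PySem.Str.lower endTime != "null" then some endTime else none))
  else st

def parse_gpt_text_response_py (response_text : String) : List (List (String × Option String)) :=
  let lines := (PySem.Str.split? (PySem.Str.strip response_text) "\n").getD []
  let st := lines.foldl
    (fun st raw =>
      let line := PySem.Str.strip raw
      if line == "" then st else pvA_line st line)
    (([] : List (PySem.Dict String (Option String))), PySem.Dict.empty)
  let events := if st.2.items.isEmpty then st.1 else st.1 ++ [st.2]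
  events.map (·.items)

-- ===== PORT B =====
def pvB_val (line : String) : String :=
  PySem.Str.strip (((PySem.Str.splitMax? line ":" 1).getD []).getD 1 "")

-- segment splitting: a new segment starts at every Event:/event: line
def pvB_segstep (p : List (List String) × List String) (line : String) :
    List (List String) × List String :=
  if PySem.Str.startswith line "Event:" || PySem.Str.startswith line "event:" then
    (p.1 ++ [p.2], [line])
  else (p.1, p.2 ++ [line])

-- field scan inside one segment
def pvB_step (d : PySem.Dict String (Option String)) (line : String) :
    PySem.Dict String (Option String) :=
  if PySem.Str.startswith line "Event:" || PySem.Str.startswith line "event:" then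
    d.insert "event" (some (pvB_val line))
  else if PySem.Str.startswith line "Start:" || PySem.Str.startswith line "start:" then
    d.insert "start" (some (pvB_val line))
  else if PySem.Str.startswith line "End:" || PySem.Str.startswith line "end:" then
    let v := pvB_val line
    d.insert "end" (if PySem.Str.lower v != "null" then some v else none)
  else d

def pvB_segToDict (seg : List String) : PySem.Dict String (Option String) :=
  seg.foldl pvB_step PySem.Dict.empty

-- keep a segment's dict only if non-empty
def pvB_app (evs : List (PySem.Dict String (Option String))) (seg : List String) :
    List (PySem.Dict String (Option String)) :=
  let d := pvB_segToDict seg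
  if d.items.isEmpty then evs else evs ++ [d]

def parse_gpt_text_response_py_alt (response_text : String) : List (List (String × Option String)) :=
  let cleaned := (((PySem.Str.split? (PySem.Str.strip response_text) "\n").getD []).map PySem.Str.strip).filter
    (fun l => l != "")
  let p := cleaned.foldl pvB_segstep (([] : List (List String)), ([] : List String))
  let segments := p.1 ++ [p.2]
  let events := segments.foldl pvB_app ([] : List (PySem.Dict String (Option String)))
  events.map (·.items)

-- ===== PRECONDITION & SPEC =====
def Spec_parse_gpt_text_response_py (response_text : String) (out : List (List (String × Option String))) : Prop := out = parse_gpt_text_response_py_alt response_text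
instance (response_text : String) (out : List (List (String × Option String))) : Decidable (Spec_parse_gpt_text_response_py response_text out) := by unfold Spec_parse_gpt_text_response_py; infer_instance

-- ===== CLAIM (what is proved, stated in full; the proofs are below) =====
def Claim_equal_parse_gpt_text_response_py : Prop := ∀ (response_text : String), Dom_parse_gpt_text_response_py response_text → Spec_parse_gpt_text_response_py response_text (parse_gpt_text_response_py response_text)

-- ===== LEMMAS AND PROOFS =====

-- reference recursion: process the remaining cleaned lines with `cur` as the open event dict
def pvG : PySem.Dict String (Option String) → List String → List (PySem.Dict String (Option String))
  | cur, [] => if cur.items.isEmpty then [] else [cur]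
  | cur, l :: ls =>
    if PySem.Str.startswith l "Event:" || PySem.Str.startswith l "event:" then
      (if cur.items.isEmpty then [] else [cur]) ++
        pvG (PySem.Dict.insert PySem.Dict.empty "event" (some (pvB_val l))) ls
    else pvG (pvB_step cur l) ls

lemma pvA_line_of_not_event (evs : List (PySem.Dict String (Option String)))
    (cur : PySem.Dict String (Option String)) (l : String)
    (h : (PySem.Str.startswith l "Event:" || PySem.Str.startswith l "event:") = false) :
    pvA_line (evs, cur) l = (evs, pvB_step cur l) := by
  simp only [pvA_line, pvB_step, pvA_val, pvB_val, h, Bool.false_eq_true, if_false]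
  split_ifs <;> rfl

lemma pvA_fold_filter (lines : List String)
    (st : List (PySem.Dict String (Option String)) × PySem.Dict String (Option String)) :
    lines.foldl (fun st raw =>
        let line := PySem.Str.strip raw
        if line == "" then st else pvA_line st line) st
      = ((lines.map PySem.Str.strip).filter (fun l => l != "")).foldl pvA_line st := by
  induction lines generalizing st with
  | nil => rfl
  | cons h t ih =>
    simp only [List.foldl_cons, List.map_cons, List.filter_cons]
    rw [ih]
    by_cases hb : PySem.Str.strip h = ""
    · simp [hb]
    · simp [hb]

lemma pvA_eq_pvG (ls : List String) (evs : List (PySem.Dict String (Option String)))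
    (cur : PySem.Dict String (Option String)) :
    (if (ls.foldl pvA_line (evs, cur)).2.items.isEmpty then (ls.foldl pvA_line (evs, cur)).1
     else (ls.foldl pvA_line (evs, cur)).1 ++ [(ls.foldl pvA_line (evs, cur)).2])
      = evs ++ pvG cur ls := by
  induction ls generalizing evs cur with
  | nil =>
    simp only [List.foldl_nil, pvG]
    by_cases hc : cur.items.isEmpty <;> simp [hc]
  | cons l ls ih =>
    simp only [List.foldl_cons, pvG]
    cases he : (PySem.Str.startswith l "Event:" || PySem.Str.startswith l "event:")
    · rw [pvA_line_of_not_event evs cur l he]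
      simp only [Bool.false_eq_true, if_false]
      exact ih evs (pvB_step cur l)
    · have hA : pvA_line (evs, cur) l =
          ((if cur.items.isEmpty then evs else evs ++ [cur]),
            PySem.Dict.insert PySem.Dict.empty "event" (some (pvB_val l))) := by
        simp only [pvA_line, pvA_val, pvB_val, he, if_true]
      rw [hA, ih]
      by_cases hc : cur.items.isEmpty <;> simp [hc]

lemma pvB_eq_pvG (ls : List String) (done : List (List String)) (seg : List String)
    (evs : List (PySem.Dict String (Option String))) :
    ((ls.foldl pvB_segstep (done, seg)).1 ++ [(ls.foldl pvB_segstep (done, seg)).2]).foldl pvB_app evs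
      = done.foldl pvB_app evs ++ pvG (pvB_segToDict seg) ls := by
  induction ls generalizing done seg evs with
  | nil =>
    simp only [List.foldl_nil, List.foldl_append, List.foldl_cons, pvG]
    by_cases hc : (pvB_segToDict seg).items.isEmpty <;> simp [pvB_app, hc]
  | cons l ls ih =>
    simp only [List.foldl_cons, pvG]
    cases he : (PySem.Str.startswith l "Event:" || PySem.Str.startswith l "event:")
    · simp only [pvB_segstep, he, Bool.false_eq_true, if_false]
      rw [ih]
      have : pvB_segToDict (seg ++ [l]) = pvB_step (pvB_segToDict seg) l := by
        simp [pvB_segToDict, List.foldl_append]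
      rw [this]
    · simp only [pvB_segstep, he, if_true]
      rw [ih]
      have hfresh : pvB_segToDict [l]
          = PySem.Dict.insert PySem.Dict.empty "event" (some (pvB_val l)) := by
        simp only [pvB_segToDict, List.foldl_cons, List.foldl_nil, pvB_step, he, if_true]
      rw [hfresh, List.foldl_append, List.foldl_cons, List.foldl_nil]
      by_cases hc : (pvB_segToDict seg).items.isEmpty <;> simp [pvB_app, hc]

-- ===== VERDICT (by name: the statement is the Claim_ definition above) =====
theorem parse_gpt_text_response_py_spec : Claim_equal_parse_gpt_text_response_py := by
  intro t _
  unfold Spec_parse_gpt_text_response_py parse_gpt_text_response_py parse_gpt_text_response_py_alt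
  simp only [pvA_fold_filter]
  rw [pvA_eq_pvG, pvB_eq_pvG]
  simp [pvB_segToDict]
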